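-- pv_equiv track=rewrite | github.com/spraakbanken/karp-backend | karp/foundation/batch.py | batch_items
-- ===== SOURCE A (Python) =====
-- from itertools import groupby, repeat
-- from typing import Iterable, Iterator
--
-- def batch_items(items: Iterable, max_batch_size=None) -> Iterator[list]:
--     """
--     Split a sequence of items up into batches.
--
--     The batches start off very small and increase in size, so that if you just
--     want the first few results you don't need to wait for a big batch.
--     """
--
--     # Idea: pair each item up with a batch number, then use groupby
--     # on the batch numbers
--
--     def batch_numbers():
--         # yields 1, 2, 2, 3, 3, 3, 3, ...
--
--         i = 1  # batch number
--         n = 1  # number of items in this batch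
--
--         while True:
--             yield from repeat(i, n)
--
--             i += 1
--             n *= 2
--             if max_batch_size is not None:
--                 n = min(n, max_batch_size)
--
--     for _, group in groupby(zip(batch_numbers(), items), key=lambda pair: pair[0]):
--         yield [item for _, item in group]
-- ===== SOURCE B (Python) =====
-- def batch_items(items, max_batch_size=None):
--     """Split items into exponentially growing batches (direct accumulation)."""
--     buf = []
--     n = 1
--     for x in items:
--         buf.append(x)
--         if len(buf) >= n:
--             yield buf
--             buf = []
--             n *= 2
--             if max_batch_size is not None:
--                 n = min(n, max_batch_size)
--     if buf:
--         yield buf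
-- ===== Notes on version B (the rewrite author's own statement) =====
-- stated objective: simpler
-- what changed: Replaces the infinite batch-number stream + zip + groupby machinery with a single loop keeping an explicit buffer and target size, yielding the buffer whenever it fills.
-- outside the precondition, e.g. on batch_items([1, 2], 0): A does not finish within the time limit, B returns [[1], [2]]
import Mathlib
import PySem

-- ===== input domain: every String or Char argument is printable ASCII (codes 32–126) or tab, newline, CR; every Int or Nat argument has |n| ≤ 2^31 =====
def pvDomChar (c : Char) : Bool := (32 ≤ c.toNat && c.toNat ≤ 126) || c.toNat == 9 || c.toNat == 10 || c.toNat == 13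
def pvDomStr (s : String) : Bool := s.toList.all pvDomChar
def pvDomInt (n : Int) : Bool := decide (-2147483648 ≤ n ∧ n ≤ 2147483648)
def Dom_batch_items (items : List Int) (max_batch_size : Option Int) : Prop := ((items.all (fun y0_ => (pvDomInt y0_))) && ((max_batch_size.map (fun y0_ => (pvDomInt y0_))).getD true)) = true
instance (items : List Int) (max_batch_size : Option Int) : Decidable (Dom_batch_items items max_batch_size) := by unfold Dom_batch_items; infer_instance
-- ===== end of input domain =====

-- B replaces the batch-number stream + zip + groupby of A with one loop over the items
-- keeping an explicit buffer and target size; equivalence of the RETURNED batch list is proved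
-- on Pre_ (max_batch_size = None or positive, where A terminates).

-- ===== PORT A =====
-- A's n *= 2; n = min(n, max_batch_size) step
def capStep (mbs : Option Int) (n : Int) : Int :=
  match mbs with
  | none => n
  | some m => min n m

-- A's batch_numbers() stream, materialised to exactly `len` entries (the many copies
-- zip consumes); the `t = 0` guard returns [] exactly where the Python generator
-- would loop forever producing nothing (n ≤ 0), which Pre_ excludes.
def batchNums (len : Nat) (i n : Int) (mbs : Option Int) : List Int :=
  if _hlen : len = 0 then []
  else if _ht : min n.toNat len = 0 then []
  else List.replicate (min n.toNat len) i
        ++ batchNums (len - min n.toNat len) (i + 1) (capStep mbs (n * 2)) mbs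
  termination_by len
  decreasing_by omega

-- itertools.groupby over key = first component, keeping the second components
def groupRuns : List (Int × Int) → List (List Int)
  | [] => []
  | (k, v) :: rest =>
      (v :: (rest.takeWhile (fun p => p.1 == k)).map Prod.snd)
        :: groupRuns (rest.dropWhile (fun p => p.1 == k))
  termination_by l => l.length
  decreasing_by
    simp only [List.length_cons]
    exact Nat.lt_succ_of_le (List.length_dropWhile_le _ _)

def batch_items (items : List Int) (max_batch_size : Option Int) : List (List Int) :=
  groupRuns ((batchNums items.length 1 1 max_batch_size).zip items)

-- ===== PORT B =====
-- the loop of Source B: explicit buffer buf and target size n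
-- Source B's size update: n *= 2; if mbs is not None: n = min(n, mbs)
def nextSize (mbs : Option Int) (n : Int) : Int :=
  match mbs with
  | none => n * 2
  | some m => min (n * 2) m

def altGo (mbs : Option Int) : List Int → List Int → Int → List (List Int)
  | [], buf, _ => if buf.isEmpty then [] else [buf]
  | x :: rest, buf, n =>
      -- buf' = buf ++ [x] (Source B's buf.append(x)), inlined
      if ((buf ++ [x]).length : Int) ≥ n then
        (buf ++ [x]) :: altGo mbs rest [] (nextSize mbs n)
      else altGo mbs rest (buf ++ [x]) n

def batch_items_alt (items : List Int) (max_batch_size : Option Int) : List (List Int) :=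
  altGo max_batch_size items [] 1

-- ===== PRECONDITION & SPEC =====
-- Pre_ excludes max_batch_size ≤ 0 (as a concrete int), on which A's batch_numbers()
-- generator loops forever yielding nothing, so A diverges while B returns size-1 batches.
def Pre_batch_items (items : List Int) (max_batch_size : Option Int) : Prop :=
  ∀ m, max_batch_size = some m → 1 ≤ m
instance (items : List Int) (max_batch_size : Option Int) : Decidable (Pre_batch_items items max_batch_size) := by unfold Pre_batch_items; infer_instance

def pvWitness_batch_items : List Int × Option Int := ([3, 1, 4, 1, 5, 9, 2, 6], some 3)

def Spec_batch_items (items : List Int) (max_batch_size : Option Int) (out : List (List Int)) : Prop := out = batch_items_alt items max_batch_size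
instance (items : List Int) (max_batch_size : Option Int) (out : List (List Int)) : Decidable (Spec_batch_items items max_batch_size out) := by unfold Spec_batch_items; infer_instance

-- ===== CLAIM (what is proved, stated in full; the proofs are below) =====
def Claim_equal_batch_items : Prop := ∀ (items : List Int) (max_batch_size : Option Int), Dom_batch_items items max_batch_size → Pre_batch_items items max_batch_size → Spec_batch_items items max_batch_size (batch_items items max_batch_size)

-- ===== LEMMAS AND PROOFS =====

-- the capped doubling preserves positivity under Pre_
lemma capStep_pos (mbs : Option Int) (n : Int) (hn : 1 ≤ n)
    (hm : ∀ m, mbs = some m → 1 ≤ m) : 1 ≤ capStep mbs (n * 2) := by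
  cases mbs with
  | none => simp [capStep]; omega
  | some m => simp [capStep]; exact ⟨by omega, hm m rfl⟩

-- every batch number produced starting from i is ≥ i
lemma batchNums_ge (len : Nat) (i n : Int) (mbs : Option Int) :
    ∀ k ∈ batchNums len i n mbs, i ≤ k := by
  induction len using Nat.strong_induction_on generalizing i n with
  | _ len ih =>
    intro k hk
    rw [batchNums] at hk
    by_cases hlen : len = 0
    · simp [hlen] at hk
    · rw [dif_neg hlen] at hk
      by_cases ht : min n.toNat len = 0
      · simp [ht] at hk
      · rw [dif_neg ht] at hk
        simp only [List.mem_append, List.mem_replicate] at hk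
        rcases hk with ⟨_, rfl⟩ | hk
        · exact le_refl _
        · have := ih (len - min n.toNat len) (by omega) (i + 1) (capStep mbs (n * 2)) k hk
          omega

-- zip of a constant key list with values of the same length is a map
lemma zip_replicate_map (i : Int) (ys : List Int) :
    (List.replicate ys.length i).zip ys = ys.map (fun v => (i, v)) := by
  induction ys with
  | nil => rfl
  | cons y ys ih => simp [List.replicate_succ, ih]

lemma takeWhile_block (i : Int) (ys : List Int) (rest : List (Int × Int))
    (hrest : ∀ p ∈ rest, p.1 ≠ i) :
    (ys.map (fun v => (i, v)) ++ rest).takeWhile (fun p => p.1 == i)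
      = ys.map (fun v => (i, v)) ∧
    (ys.map (fun v => (i, v)) ++ rest).dropWhile (fun p => p.1 == i) = rest := by
  induction ys with
  | nil =>
    cases rest with
    | nil => simp
    | cons p rest =>
      have : (p.1 == i) = false := by
        simp only [beq_eq_false_iff_ne]; exact hrest p (by simp)
      simp [this]
  | cons y ys ih =>
    simp [ih.1, ih.2]

-- groupby takes exactly one constant-key block when the remainder starts with a different key
lemma groupRuns_block (i : Int) (ys : List Int) (rest : List (Int × Int))
    (hys : ys ≠ []) (hrest : ∀ p ∈ rest, p.1 ≠ i) :
    groupRuns (ys.map (fun v => (i, v)) ++ rest) = ys :: groupRuns rest := by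
  cases ys with
  | nil => exact absurd rfl hys
  | cons y ys =>
    rw [List.map_cons, List.cons_append, groupRuns]
    rw [(takeWhile_block i ys rest hrest).1, (takeWhile_block i ys rest hrest).2]
    simp

-- Source B's loop yields buf ++ (next chunk) and continues with the doubled size
lemma altGo_chunk (mbs : Option Int) (xs buf : List Int) (n : Int)
    (hn : 1 ≤ n) (hbuf : (buf.length : Int) < n) (hne : buf ≠ [] ∨ xs ≠ []) :
    altGo mbs xs buf n
      = (buf ++ xs.take (n.toNat - buf.length))
          :: altGo mbs (xs.drop (n.toNat - buf.length)) [] (nextSize mbs n) := by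
  induction xs generalizing buf with
  | nil =>
    have hb : buf ≠ [] := by rcases hne with h | h; exact h; exact absurd rfl h
    simp [altGo, hb]
  | cons x rest ih =>
    show (if ((buf ++ [x]).length : Int) ≥ n then
        (buf ++ [x]) :: altGo mbs rest [] (nextSize mbs n)
      else altGo mbs rest (buf ++ [x]) n) = _
    by_cases hge : ((buf ++ [x]).length : Int) ≥ n
    · rw [if_pos hge]
      have hlen : buf.length + 1 = n.toNat := by
        simp at hge; omega
      have hd : n.toNat - buf.length = 1 := by omega
      simp [hd]
    · rw [if_neg hge]
      have hlt : ((buf ++ [x]).length : Int) < n := by omega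
      have hd : 2 ≤ n.toNat - buf.length := by
        simp at hlt; omega
      rw [ih (buf ++ [x]) hlt (Or.inl (by simp))]
      have h1 : n.toNat - (buf ++ [x]).length = (n.toNat - buf.length) - 1 := by
        simp; omega
      obtain ⟨d, hdd, _⟩ : ∃ d, n.toNat - buf.length = d + 1 ∧ 1 ≤ d :=
        ⟨n.toNat - buf.length - 1, by omega⟩
      have h2 : n.toNat - (buf.length + 1) = d := by
        simp at h1; omega
      simp [hdd, h2]

-- the main correspondence: A's grouped stream equals B's accumulation loop
lemma main_eq (len : Nat) (xs : List Int) (i n : Int) (mbs : Option Int)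
    (hlen : xs.length = len) (hn : 1 ≤ n) (hm : ∀ m, mbs = some m → 1 ≤ m) :
    groupRuns ((batchNums xs.length i n mbs).zip xs) = altGo mbs xs [] n := by
  induction len using Nat.strong_induction_on generalizing xs i n with
  | _ len ih =>
    cases xs with
    | nil => simp [batchNums, altGo, groupRuns]
    | cons x rest =>
      set xs := x :: rest with hxs
      have hx0 : xs.length ≠ 0 := by simp [hxs]
      have ht1 : 1 ≤ min n.toNat xs.length := by
        have h1 : 1 ≤ n.toNat := by omega
        have h2 : 1 ≤ xs.length := by simp [hxs]
        omega
      rw [batchNums, dif_neg hx0, dif_neg (by omega)]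
      set t := min n.toNat xs.length with htdef
      set n' := capStep mbs (n * 2) with hn'def
      have hn' : 1 ≤ n' := capStep_pos mbs n hn hm
      have htle : t ≤ xs.length := Nat.min_le_right _ _
      have hlt : (xs.take t).length = t := List.length_take_of_le htle
      have hld : (xs.drop t).length = xs.length - t := List.length_drop
      have hzip : (List.replicate t i ++ batchNums (xs.length - t) (i + 1) n' mbs).zip xs
          = (xs.take t).map (fun v => (i, v))
            ++ (batchNums (xs.length - t) (i + 1) n' mbs).zip (xs.drop t) := by
        conv_lhs => rw [show xs = xs.take t ++ xs.drop t from (List.take_append_drop t xs).symm]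
        rw [List.zip_append (by simp [hlt])]
        have hz := zip_replicate_map i (xs.take t)
        rw [hlt] at hz
        rw [hz, List.take_append_drop]
      rw [hzip]
      have hrest : ∀ p ∈ (batchNums (xs.length - t) (i + 1) n' mbs).zip (xs.drop t), p.1 ≠ i := by
        intro p hp
        have := batchNums_ge (xs.length - t) (i + 1) n' mbs p.1 (List.of_mem_zip hp).1
        omega
      have htne : xs.take t ≠ [] := by
        intro h
        have h' := congrArg List.length h
        rw [hlt] at h'
        simp at h'
        omega
      rw [groupRuns_block i (xs.take t) _ htne hrest]
      have hrec : groupRuns ((batchNums (xs.length - t) (i + 1) n' mbs).zip (xs.drop t))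
          = altGo mbs (xs.drop t) [] n' := by
        rw [← hld]
        exact ih (xs.drop t).length (by omega) (xs.drop t) (i + 1) n' rfl hn'
      rw [hrec]
      rw [altGo_chunk mbs xs [] n hn (by simpa using hn) (Or.inr (by simp [hxs]))]
      have htake : xs.take (n.toNat - ([] : List Int).length) = xs.take t := by
        simp only [List.length_nil, Nat.sub_zero, htdef]
        rw [List.take_eq_take_min]
      have hdrop : xs.drop (n.toNat - ([] : List Int).length) = xs.drop t := by
        simp only [List.length_nil, Nat.sub_zero, htdef]
        by_cases h : n.toNat ≤ xs.length
        · simp [Nat.min_eq_left h]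
        · rw [List.drop_eq_nil_of_le (by omega), List.drop_eq_nil_of_le (by omega)]
      have hcap : nextSize mbs n = n' := by
        cases mbs <;> simp [nextSize, hn'def, capStep]
      rw [htake, hdrop, hcap]
      simp

-- ===== VERDICT (by name: the statement is the Claim_ definition above) =====
theorem batch_items_spec : Claim_equal_batch_items := by
  intro items mbs _ hpre
  unfold Spec_batch_items batch_items batch_items_alt
  exact main_eq items.length items 1 1 mbs rfl (by omega) hpre
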